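-- pv_equiv track=rewrite | github.com/wenxind/privacy-utility-tradeoff-in-peer-review-data | projection.py | lr_chain
-- ===== SOURCE A (Python) =====
-- def lr_chain(sorted_assignments, graph):
--     chain_map = dict()
--     index_map = dict()
--     total_assignments = len(sorted_assignments)
--
--     for i in range(total_assignments):
--         chain_map[sorted_assignments[i]] = [1, 1]
--         index_map[sorted_assignments[i]] = i
--
--     for i in range(total_assignments):
--         elem = sorted_assignments[i]
--         neighbors = graph[elem]
--         left = []
--         for neighbor in neighbors:
--             if index_map[neighbor] < index_map[elem]:
--                 left.append(chain_map[neighbor][0]+1)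
--         if left != []:
--             chain_map[elem][0] = max(left)
--
--     for i in range(total_assignments):
--         elem = sorted_assignments[total_assignments-1-i]
--         neighbors = graph[elem]
--         right = []
--         for neighbor in neighbors:
--             if index_map[neighbor] > index_map[elem]:
--                 right.append(chain_map[neighbor][1]+1)
--         if right != []:
--             chain_map[elem][1] = max(right)
--
--     return chain_map
-- ===== SOURCE B (Python) =====
-- def lr_chain(sorted_assignments, graph):
--     index_map = {}
--     for i, e in enumerate(sorted_assignments):
--         index_map[e] = i
--
--     def solve(e, memo, earlier):
--         cached = memo.get(e)
--         if cached is not None: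
--             return cached
--         ie = index_map[e]
--         best = 1
--         for nb in graph[e]:
--             inb = index_map[nb]
--             if (inb < ie) if earlier else (inb > ie):
--                 best = max(best, solve(nb, memo, earlier) + 1)
--         memo[e] = best
--         return best
--
--     left_memo, right_memo = {}, {}
--     result = {}
--     for e in sorted_assignments:
--         result[e] = [solve(e, left_memo, True), solve(e, right_memo, False)]
--     return result
-- ===== Notes on version B (the rewrite author's own statement) =====
-- stated objective: alternative
-- what changed: Replaces the two ordered forward/backward index sweeps over sorted_assignments with two memoized depth-first recursions over the edge structure (left/right cache dicts, each node resolved once), the result dict being built in a single pass.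
import Mathlib
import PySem

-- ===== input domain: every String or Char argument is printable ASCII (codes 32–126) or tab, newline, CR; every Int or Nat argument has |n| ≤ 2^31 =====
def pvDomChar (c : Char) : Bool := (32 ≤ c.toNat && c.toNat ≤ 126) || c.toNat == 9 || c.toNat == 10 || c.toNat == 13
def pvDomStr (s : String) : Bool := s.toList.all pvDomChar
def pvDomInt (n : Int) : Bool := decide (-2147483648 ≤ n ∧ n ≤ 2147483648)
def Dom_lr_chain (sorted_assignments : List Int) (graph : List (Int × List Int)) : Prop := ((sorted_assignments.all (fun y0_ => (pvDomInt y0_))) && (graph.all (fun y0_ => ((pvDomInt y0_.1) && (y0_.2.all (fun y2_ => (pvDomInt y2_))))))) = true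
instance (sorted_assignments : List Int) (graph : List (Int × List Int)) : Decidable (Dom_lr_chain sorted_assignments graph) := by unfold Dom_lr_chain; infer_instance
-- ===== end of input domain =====

-- B replaces A's two ordered forward/backward index sweeps by two memoized depth-first
-- recursions over the edge structure (alternative decomposition, same asymptotic cost).

-- ===== PORT A =====
-- first loop: chain_map[sa[i]] = [1,1]; index_map[sa[i]] = i
def lr_chain_init (sorted_assignments : List Int) :
    PySem.Dict Int (List Int) × PySem.Dict Int Int :=
  (PySem.List.pyRange 0 (sorted_assignments.length : Int) 1).foldl
    (fun (st : PySem.Dict Int (List Int) × PySem.Dict Int Int) i =>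
      (st.1.insert (PySem.List.pyGetD sorted_assignments i 0) [1, 1],
       st.2.insert (PySem.List.pyGetD sorted_assignments i 0) i))
    (PySem.Dict.empty, PySem.Dict.empty)

-- second loop (left sweep)
def lr_chain_left (g : PySem.Dict Int (List Int)) (im : PySem.Dict Int Int)
    (sorted_assignments : List Int) (cm0 : PySem.Dict Int (List Int)) :
    PySem.Dict Int (List Int) :=
  (PySem.List.pyRange 0 (sorted_assignments.length : Int) 1).foldl
    (fun cm i =>
      let elem := PySem.List.pyGetD sorted_assignments i 0
      let neighbors := g.getD elem []
      let left := neighbors.foldl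
        (fun acc nb =>
          if im.getD nb 0 < im.getD elem 0 then
            acc ++ [PySem.List.pyGetD (cm.getD nb []) 0 0 + 1]
          else acc) []
      if left ≠ [] then
        cm.modify elem [1, 1] (fun v => v.set 0 ((PySem.List.max? left (fun x => x)).getD 0))
      else cm)
    cm0

-- third loop (right sweep, positions n-1-i)
def lr_chain_right (g : PySem.Dict Int (List Int)) (im : PySem.Dict Int Int)
    (sorted_assignments : List Int) (cm0 : PySem.Dict Int (List Int)) :
    PySem.Dict Int (List Int) :=
  (PySem.List.pyRange 0 (sorted_assignments.length : Int) 1).foldl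
    (fun cm i =>
      let elem := PySem.List.pyGetD sorted_assignments ((sorted_assignments.length : Int) - 1 - i) 0
      let neighbors := g.getD elem []
      let right := neighbors.foldl
        (fun acc nb =>
          if im.getD nb 0 > im.getD elem 0 then
            acc ++ [PySem.List.pyGetD (cm.getD nb []) 1 0 + 1]
          else acc) []
      if right ≠ [] then
        cm.modify elem [1, 1] (fun v => v.set 1 ((PySem.List.max? right (fun x => x)).getD 0))
      else cm)
    cm0

def lr_chain (sorted_assignments : List Int) (graph : List (Int × List Int)) : List (Int × List Int) :=
  let g := PySem.Dict.mk graph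
  let p := lr_chain_init sorted_assignments
  (lr_chain_right g p.2 sorted_assignments
    (lr_chain_left g p.2 sorted_assignments p.1)).items

-- ===== PORT B =====
-- memoized DFS: left (earlier = true) / right (earlier = false) chain length of e,
-- threading the memo dict; fuel only makes the recursion structural (unreachable under Pre_)
def lr_chain_solve (g : PySem.Dict Int (List Int)) (im : PySem.Dict Int Int) (earlier : Bool) :
    Nat → PySem.Dict Int Int → Int → PySem.Dict Int Int × Int
  | 0, memo, _ => (memo, 1)
  | f + 1, memo, e =>
    match memo.get? e with
    | some v => (memo, v)
    | none =>
      let ie := im.getD e 0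
      let r := (g.getD e []).foldl
        (fun (p : PySem.Dict Int Int × Int) nb =>
          let inb := im.getD nb 0
          let ok : Bool := if earlier then decide (inb < ie) else decide (inb > ie)
          if ok then
            let q := lr_chain_solve g im earlier f p.1 nb
            (q.1, max p.2 (q.2 + 1))
          else p)
        (memo, 1)
      (r.1.insert e r.2, r.2)

def lr_chain_alt (sorted_assignments : List Int) (graph : List (Int × List Int)) : List (Int × List Int) :=
  let g := PySem.Dict.mk graph
  let im := (PySem.List.enumerate sorted_assignments 0).foldl
    (fun d pr => d.insert pr.2 pr.1) PySem.Dict.empty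
  let st := sorted_assignments.foldl
    (fun (st : PySem.Dict Int Int × PySem.Dict Int Int × PySem.Dict Int (List Int)) e =>
      let q1 := lr_chain_solve g im true sorted_assignments.length st.1 e
      let q2 := lr_chain_solve g im false sorted_assignments.length st.2.1 e
      (q1.1, q2.1, st.2.2.insert e [q1.2, q2.2]))
    (PySem.Dict.empty, PySem.Dict.empty, PySem.Dict.empty)
  st.2.2.items

-- ===== PRECONDITION & SPEC =====
-- Pre_ excludes exactly the inputs where Python A raises KeyError: an element of
-- sorted_assignments that is not a key of graph, or a listed neighbor of such an
-- element that is not in sorted_assignments (hence not a key of index_map/chain_map).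
def Pre_lr_chain (sorted_assignments : List Int) (graph : List (Int × List Int)) : Prop :=
  ∀ e ∈ sorted_assignments,
    (PySem.Dict.mk graph).contains e = true ∧
    ∀ nb ∈ (PySem.Dict.mk graph).getD e [], nb ∈ sorted_assignments
instance (sorted_assignments : List Int) (graph : List (Int × List Int)) : Decidable (Pre_lr_chain sorted_assignments graph) := by unfold Pre_lr_chain; infer_instance

def pvWitness_lr_chain : List Int × (List (Int × List Int)) :=
  ([1, 2, 3], [(1, [2]), (2, [1, 3]), (3, [2])])

def Spec_lr_chain (sorted_assignments : List Int) (graph : List (Int × List Int)) (out : List (Int × List Int)) : Prop := out = lr_chain_alt sorted_assignments graph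
instance (sorted_assignments : List Int) (graph : List (Int × List Int)) (out : List (Int × List Int)) : Decidable (Spec_lr_chain sorted_assignments graph out) := by unfold Spec_lr_chain; infer_instance

-- ===== CLAIM (what is proved, stated in full; the proofs are below) =====
def Claim_equal_lr_chain : Prop := ∀ (sorted_assignments : List Int) (graph : List (Int × List Int)), Dom_lr_chain sorted_assignments graph → Pre_lr_chain sorted_assignments graph → Spec_lr_chain sorted_assignments graph (lr_chain sorted_assignments graph)

-- ===== LEMMAS AND PROOFS =====

-- ---- the index map both programs build: e ↦ last index of e in sa ----
def pvIm (sa : List Int) : PySem.Dict Int Int :=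
  (PySem.List.enumerate sa 0).foldl (fun d pr => d.insert pr.2 pr.1) PySem.Dict.empty

theorem pvIm_append (xs : List Int) (x : Int) :
    pvIm (xs ++ [x]) = (pvIm xs).insert x (xs.length : Int) := by
  unfold pvIm
  rw [PySem.List.enumerate_append, List.foldl_append]
  simp [PySem.List.enumerate]

theorem pvIm_getD_nonneg (sa : List Int) (k : Int) : 0 ≤ (pvIm sa).getD k 0 := by
  induction sa using List.reverseRecOn with
  | nil => simp [pvIm, PySem.List.enumerate_nil]
  | append_singleton xs x ih =>
      rw [pvIm_append, PySem.Dict.getD_insert]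
      split_ifs with h
      · positivity
      · exact ih

theorem pvIm_getD_lt (sa : List Int) (hsa : sa ≠ []) (k : Int) :
    (pvIm sa).getD k 0 < (sa.length : Int) := by
  induction sa using List.reverseRecOn with
  | nil => exact absurd rfl hsa
  | append_singleton xs x ih =>
      rw [pvIm_append, PySem.Dict.getD_insert]
      split_ifs with h
      · simp
      · rcases eq_or_ne xs [] with h0 | h0
        · subst h0; simp [pvIm, PySem.List.enumerate_nil]
        · have := ih h0
          simp only [List.length_append, List.length_cons, List.length_nil]
          push_cast
          omega

theorem pvIm_last (sa : List Int) (e : Int) (he : e ∈ sa) :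
    ∃ (j : Nat) (hj : j < sa.length), (pvIm sa).getD e 0 = (j : Int) ∧ sa[j] = e := by
  induction sa using List.reverseRecOn with
  | nil => simp at he
  | append_singleton xs x ih =>
      rw [pvIm_append, PySem.Dict.getD_insert]
      rcases eq_or_ne e x with hx | hx
      · subst hx
        refine ⟨xs.length, by simp, by simp, ?_⟩
        simp
      · have he' : e ∈ xs := by
          rcases List.mem_append.mp he with h | h
          · exact h
          · simp at h; exact absurd h hx
        obtain ⟨j, hj, h1, h2⟩ := ih he'
        refine ⟨j, by simp; omega, ?_, ?_⟩
        · rw [if_neg hx]; exact h1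
        · rw [List.getElem_append_left hj]; exact h2

-- ---- the reference value: length of the longest admissible chain ending at e ----
def pvRef (g : PySem.Dict Int (List Int)) (G : Int → Int → Bool) : Nat → Int → Int
  | 0, _ => 1
  | f + 1, e =>
      (g.getD e []).foldl (fun b nb => if G nb e then max b (pvRef g G f nb + 1) else b) 1

def pvLVal (g : PySem.Dict Int (List Int)) (G : Int → Int → Bool) (m : Int → Nat) (e : Int) : Int :=
  pvRef g G (m e + 1) e

def pvElig (g : PySem.Dict Int (List Int)) (G : Int → Int → Bool) (e : Int) : List Int :=
  (g.getD e []).filter (fun nb => G nb e)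

theorem pvFoldl_if_max_ge (l : List Int) (P : Int → Bool) (f : Int → Int) :
    ∀ b : Int, b ≤ l.foldl (fun b nb => if P nb then max b (f nb) else b) b := by
  induction l with
  | nil => intro b; simp
  | cons a t ih =>
      intro b
      simp only [List.foldl_cons]
      split_ifs with h
      · exact le_trans (le_max_left b (f a)) (ih _)
      · exact ih b

theorem pvRef_one_le (g : PySem.Dict Int (List Int)) (G : Int → Int → Bool) (f : Nat) (e : Int) :
    1 ≤ pvRef g G f e := by
  cases f with
  | zero => simp [pvRef]
  | succ f => exact pvFoldl_if_max_ge _ _ _ 1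

theorem pvFoldl_if_max_eq (P : Int → Bool) (f : Int → Int) :
    ∀ (l : List Int) (b : Int),
      l.foldl (fun b nb => if P nb then max b (f nb) else b) b
        = ((l.filter P).map f).foldl max b := by
  intro l
  induction l with
  | nil => intro b; simp
  | cons a t ih =>
      intro b
      by_cases h : P a <;> simp [h, ih]

theorem pvRef_stable (g : PySem.Dict Int (List Int)) (G : Int → Int → Bool) (m : Int → Nat)
    (hm : ∀ nb e, G nb e = true → m nb < m e) :
    ∀ (f1 : Nat) (f2 : Nat) (e : Int), m e < f1 → m e < f2 → pvRef g G f1 e = pvRef g G f2 e := by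
  intro f1
  induction f1 with
  | zero => intro f2 e h1; omega
  | succ f1 ih =>
      intro f2 e h1 h2
      cases f2 with
      | zero => omega
      | succ f2 =>
          simp only [pvRef]
          congr 1
          funext b nb
          by_cases hG : G nb e
          · have := hm nb e hG
            rw [if_pos hG, if_pos hG, ih f2 nb (by omega) (by omega)]
          · rw [if_neg hG, if_neg hG]

theorem pvLVal_eq_fold (g : PySem.Dict Int (List Int)) (G : Int → Int → Bool) (m : Int → Nat)
    (hm : ∀ nb e, G nb e = true → m nb < m e) (e : Int) :
    pvLVal g G m e = ((pvElig g G e).map (fun nb => pvLVal g G m nb + 1)).foldl max 1 := by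
  unfold pvLVal pvElig
  conv_lhs => rw [pvRef]
  rw [show (fun (b : Int) nb => if G nb e then max b (pvRef g G (m e) nb + 1) else b)
        = (fun (b : Int) nb => if G nb e then max b (pvRef g G (m nb + 1) nb + 1) else b) from ?_]
  · rw [pvFoldl_if_max_eq]
  · funext b nb
    by_cases hG : G nb e
    · have := hm nb e hG
      rw [if_pos hG, if_pos hG, pvRef_stable g G m hm (m e) (m nb + 1) nb (by omega) (by omega)]
    · rw [if_neg hG, if_neg hG]

theorem pvLVal_one_le (g : PySem.Dict Int (List Int)) (G : Int → Int → Bool) (m : Int → Nat)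
    (e : Int) : 1 ≤ pvLVal g G m e := pvRef_one_le g G _ e

theorem pvLVal_of_elig_nil (g : PySem.Dict Int (List Int)) (G : Int → Int → Bool) (m : Int → Nat)
    (hm : ∀ nb e, G nb e = true → m nb < m e) (e : Int) (h : pvElig g G e = []) :
    pvLVal g G m e = 1 := by
  rw [pvLVal_eq_fold g G m hm e, h]; simp

-- max(lst) for a nonempty lst whose entries are all ≥ 1
theorem pvMax_getD_eq_foldl (y : Int) (t : List Int) (hy : 1 ≤ y) :
    (PySem.List.max? (y :: t) (fun x => x)).getD 0 = (y :: t).foldl max 1 := by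
  rw [PySem.List.max?_id_cons]
  simp only [Option.getD_some, List.foldl_cons]
  rw [max_eq_right hy]

-- ---- B side: correctness of the memoized DFS ----
def pvG (im : PySem.Dict Int Int) (earlier : Bool) (nb e : Int) : Bool :=
  if earlier then decide (im.getD nb 0 < im.getD e 0) else decide (im.getD nb 0 > im.getD e 0)

def pvValid (L : Int → Int) (memo : PySem.Dict Int Int) : Prop :=
  ∀ k v, memo.get? k = some v → v = L k

theorem pvSolve_fold (g : PySem.Dict Int (List Int)) (im : PySem.Dict Int Int) (earlier : Bool)
    (m : Int → Nat) (f : Nat) (e : Int)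
    (L : Int → Int)
    (ihf : ∀ memo e', m e' < f → pvValid L memo →
        (lr_chain_solve g im earlier f memo e').2 = L e' ∧
        pvValid L (lr_chain_solve g im earlier f memo e').1)
    (hme : m e < f + 1) :
    ∀ (ns : List Int) (p : PySem.Dict Int Int × Int),
      (∀ nb ∈ ns, pvG im earlier nb e = true → m nb < m e) → pvValid L p.1 →
      (ns.foldl
        (fun (p : PySem.Dict Int Int × Int) nb =>
          let inb := im.getD nb 0
          let ok : Bool := if earlier then decide (inb < im.getD e 0) else decide (inb > im.getD e 0)
          if ok then
            let q := lr_chain_solve g im earlier f p.1 nb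
            (q.1, max p.2 (q.2 + 1))
          else p) p).2
        = ns.foldl (fun b nb => if pvG im earlier nb e then max b (L nb + 1) else b) p.2 ∧
      pvValid L (ns.foldl
        (fun (p : PySem.Dict Int Int × Int) nb =>
          let inb := im.getD nb 0
          let ok : Bool := if earlier then decide (inb < im.getD e 0) else decide (inb > im.getD e 0)
          if ok then
            let q := lr_chain_solve g im earlier f p.1 nb
            (q.1, max p.2 (q.2 + 1))
          else p) p).1 := by
  intro ns
  induction ns with
  | nil => intro p _ hv; exact ⟨rfl, hv⟩
  | cons nb t ih =>
      intro p hns hv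
      simp only [List.foldl_cons]
      by_cases hG : pvG im earlier nb e = true
      · have hok : (if earlier then decide (im.getD nb 0 < im.getD e 0)
            else decide (im.getD nb 0 > im.getD e 0)) = true := hG
        have hmnb : m nb < m e := hns nb (List.mem_cons_self) hG
        obtain ⟨hq2, hq1⟩ := ihf p.1 nb (by omega) hv
        have := ih (((lr_chain_solve g im earlier f p.1 nb).1,
            max p.2 ((lr_chain_solve g im earlier f p.1 nb).2 + 1)))
            (fun x hx hgx => hns x (List.mem_cons_of_mem _ hx) hgx) hq1
        simp only [hok, if_pos, hq2] at this ⊢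
        simp only [if_pos hG]
        exact this
      · have hokG : (if earlier then decide (im.getD nb 0 < im.getD e 0)
            else decide (im.getD nb 0 > im.getD e 0)) = pvG im earlier nb e := rfl
        have hGf : pvG im earlier nb e = false := by
          revert hG; cases pvG im earlier nb e <;> simp
        simp only [hokG, hGf, Bool.false_eq_true, if_false]
        exact ih p (fun x hx hgx => hns x (List.mem_cons_of_mem _ hx) hgx) hv

theorem pvSolve_correct (g : PySem.Dict Int (List Int)) (im : PySem.Dict Int Int) (earlier : Bool)
    (m : Int → Nat)
    (hm : ∀ nb e, pvG im earlier nb e = true → m nb < m e) :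
    ∀ (f : Nat) (memo : PySem.Dict Int Int) (e : Int), m e < f →
      pvValid (pvLVal g (pvG im earlier) m) memo →
      (lr_chain_solve g im earlier f memo e).2 = pvLVal g (pvG im earlier) m e ∧
      pvValid (pvLVal g (pvG im earlier) m) (lr_chain_solve g im earlier f memo e).1 := by
  intro f
  induction f with
  | zero => intro memo e h; omega
  | succ f ih =>
      intro memo e hme hv
      rw [lr_chain_solve]
      cases hmemo : memo.get? e with
      | some v =>
          simp only
          exact ⟨hv e v hmemo, hv⟩
      | none =>
          simp only
          obtain ⟨h2, h1⟩ := pvSolve_fold g im earlier m f e (pvLVal g (pvG im earlier) m)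
            ih hme (g.getD e []) (memo, 1) (fun nb _ hg => hm nb e hg) hv
          have hval : (((g.getD e []).foldl
              (fun (p : PySem.Dict Int Int × Int) nb =>
                let inb := im.getD nb 0
                let ok : Bool := if earlier then decide (inb < im.getD e 0) else decide (inb > im.getD e 0)
                if ok then
                  let q := lr_chain_solve g im earlier f p.1 nb
                  (q.1, max p.2 (q.2 + 1))
                else p) (memo, 1))).2 = pvLVal g (pvG im earlier) m e := by
            rw [h2]
            show ((g.getD e []).foldl (fun b nb => if pvG im earlier nb e then max b (pvLVal g (pvG im earlier) m nb + 1) else b) 1) = _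
            have heq : pvLVal g (pvG im earlier) m e
                = (g.getD e []).foldl (fun b nb => if pvG im earlier nb e then max b (pvRef g (pvG im earlier) (m e) nb + 1) else b) 1 := by
              unfold pvLVal; rw [pvRef]
            rw [heq]
            congr 1
            funext b nb
            by_cases hG : pvG im earlier nb e = true
            · have := hm nb e hG
              rw [if_pos hG, if_pos hG,
                pvRef_stable g (pvG im earlier) m hm (m e) (m nb + 1) nb (by omega) (by omega)]
              rfl
            · rw [if_neg hG, if_neg hG]
          constructor
          · exact hval
          · intro k v hk
            by_cases hke : k = e
            · subst hke
              rw [PySem.Dict.get?_insert_self] at hk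
              rw [← hval]
              exact (Option.some_inj.mp hk).symm
            · rw [PySem.Dict.get?_insert_of_ne (hne := hke)] at hk
              exact h1 k v hk

-- ---- A side: the generic sweep invariant ----
def pvVal (isLeft : Bool) (oth : Int → Int) (e l : Int) : List Int :=
  if isLeft then [l, oth e] else [oth e, l]

theorem pvVal_set (isLeft : Bool) (oth : Int → Int) (e l x : Int) :
    (pvVal isLeft oth e l).set (if isLeft then 0 else 1) x = pvVal isLeft oth e x := by
  cases isLeft <;> simp [pvVal]

theorem pvVal_pyGetD (isLeft : Bool) (oth : Int → Int) (e l : Int) :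
    PySem.List.pyGetD (pvVal isLeft oth e l) (if isLeft then (0 : Int) else 1) 0 = l := by
  cases isLeft <;> simp [pvVal] <;> rfl

theorem pvGetD_irrel {ν : Type} (d : PySem.Dict Int ν) (k : Int) (h : k ∈ d.keys) (d1 d2 : ν) :
    d.getD k d1 = d.getD k d2 := by
  rw [PySem.Dict.getD_eq_get?_getD, PySem.Dict.getD_eq_get?_getD]
  cases hg : d.get? k with
  | none => exact absurd ((PySem.Dict.get?_eq_none_iff_not_mem_keys d k).mp hg) (by simpa using h)
  | some v => rfl

-- the invariant of one sweep after k steps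
def pvInv (sa : List Int) (g : PySem.Dict Int (List Int)) (G : Int → Int → Bool)
    (m : Int → Nat) (isLeft : Bool) (oth : Int → Int) (k : Nat)
    (cm : PySem.Dict Int (List Int)) : Prop :=
  cm.keys = PySem.Set.update [] sa ∧
  ∀ e ∈ sa, ∃ l, cm.getD e [1, 1] = pvVal isLeft oth e l ∧
    (m e < k → l = pvLVal g G m e) ∧ (pvElig g G e = [] → l = 1)

-- one step of a sweep, in generic form (pos = traversal position, G = admissibility guard)
def pvBody (sa : List Int) (g : PySem.Dict Int (List Int)) (G : Int → Int → Bool)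
    (pos : Int → Int) (isLeft : Bool) :
    PySem.Dict Int (List Int) → Int → PySem.Dict Int (List Int) :=
  fun cm i =>
    let elem := PySem.List.pyGetD sa (pos i) 0
    let neighbors := g.getD elem []
    let lst := neighbors.foldl
      (fun acc nb => if G nb elem then
          acc ++ [PySem.List.pyGetD (cm.getD nb []) (if isLeft then (0:Int) else 1) 0 + 1]
        else acc) []
    if lst ≠ [] then
      cm.modify elem [1, 1]
        (fun v => v.set (if isLeft then 0 else 1) ((PySem.List.max? lst (fun x => x)).getD 0))
    else cm

theorem pvSweep_step (sa : List Int) (g : PySem.Dict Int (List Int)) (G : Int → Int → Bool)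
    (m : Int → Nat) (pos : Int → Int) (isLeft : Bool) (oth : Int → Int)
    (hm : ∀ nb e, G nb e = true → m nb < m e)
    (hClosed : ∀ e ∈ sa, ∀ nb ∈ g.getD e [], nb ∈ sa)
    (hPos : ∀ i : Int, 0 ≤ i → i < (sa.length : Int) → 0 ≤ pos i ∧ pos i < (sa.length : Int))
    (hDec : ∀ e ∈ sa, m e < sa.length ∧ PySem.List.pyGetD sa (pos ((m e : Nat) : Int)) 0 = e)
    (k : Nat) (hk : k < sa.length) (cm : PySem.Dict Int (List Int))
    (hinv : pvInv sa g G m isLeft oth k cm) :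
    pvInv sa g G m isLeft oth (k + 1)
      ((fun cm (i : Int) =>
          let elem := PySem.List.pyGetD sa (pos i) 0
          let neighbors := g.getD elem []
          let lst := neighbors.foldl
            (fun acc nb => if G nb elem then
                acc ++ [PySem.List.pyGetD (cm.getD nb []) (if isLeft then (0:Int) else 1) 0 + 1]
              else acc) []
          if lst ≠ [] then
            cm.modify elem [1, 1]
              (fun v => v.set (if isLeft then 0 else 1) ((PySem.List.max? lst (fun x => x)).getD 0))
          else cm) cm (k : Int)) := by
  obtain ⟨hkeys, hval⟩ := hinv
  obtain ⟨hp0, hp1⟩ := hPos (k : Int) (by positivity) (by exact_mod_cast hk)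
  have hposnat : pos (k : Int) = ((pos (k : Int)).toNat : Int) := by omega
  have hlt : (pos (k : Int)).toNat < sa.length := by omega
  have helemeq : PySem.List.pyGetD sa (pos (k : Int)) 0 = sa[(pos (k : Int)).toNat] := by
    conv_lhs => rw [hposnat]
    rw [PySem.List.pyGetD_natCast]
    simp [List.getD_eq_getElem?_getD, List.getElem?_eq_getElem hlt]
  set ek := PySem.List.pyGetD sa (pos (k : Int)) 0 with hek
  have hekmem : ek ∈ sa := by rw [helemeq]; exact List.getElem_mem hlt
  have hlst : (g.getD ek []).foldl
      (fun acc nb => if G nb ek then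
          acc ++ [PySem.List.pyGetD (cm.getD nb []) (if isLeft then (0:Int) else 1) 0 + 1]
        else acc) []
      = (pvElig g G ek).map
          (fun nb => PySem.List.pyGetD (cm.getD nb []) (if isLeft then (0:Int) else 1) 0 + 1) := by
    rw [PySem.List.foldl_append_if
      (p := fun nb => G nb ek)
      (f := fun nb => PySem.List.pyGetD (cm.getD nb []) (if isLeft then (0:Int) else 1) 0 + 1)]
    rfl
  have hread : ∀ nb ∈ pvElig g G ek,
      ∃ lnb, PySem.List.pyGetD (cm.getD nb []) (if isLeft then (0:Int) else 1) 0 = lnb ∧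
        (m nb < k → lnb = pvLVal g G m nb) := by
    intro nb hnb
    have hnbg : nb ∈ g.getD ek [] := List.mem_of_mem_filter hnb
    have hnbsa : nb ∈ sa := hClosed ek hekmem nb hnbg
    obtain ⟨l, hl, hfin, _⟩ := hval nb hnbsa
    have hkeysmem : nb ∈ cm.keys := by
      rw [hkeys, PySem.Set.mem_update]; right; exact hnbsa
    refine ⟨l, ?_, hfin⟩
    rw [pvGetD_irrel cm nb hkeysmem [] [1, 1], hl, pvVal_pyGetD]
  simp only
  rw [hlst]
  by_cases hnil : pvElig g G ek = []
  · -- no write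
    rw [hnil]
    simp only [List.map_nil, ne_eq, not_true_eq_false, if_false]
    refine ⟨hkeys, ?_⟩
    intro e he
    obtain ⟨l, hl, hfin, hnl⟩ := hval e he
    refine ⟨l, hl, ?_, hnl⟩
    intro hme
    rcases Nat.lt_or_ge (m e) k with h | h
    · exact hfin h
    · have hmek : m e = k := by omega
      have heek : e = ek := by
        have h2 := (hDec e he).2
        rw [hmek] at h2
        rw [hek]; exact h2.symm
      subst heek
      rw [hnl hnil, pvLVal_of_elig_nil g G m hm ek hnil]
  · -- write happens
    obtain ⟨nb0, elig', helig⟩ : ∃ a t, pvElig g G ek = a :: t := by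
      cases h : pvElig g G ek with
      | nil => exact absurd h hnil
      | cons a t => exact ⟨a, t, rfl⟩
    have hmapne : (pvElig g G ek).map
        (fun nb => PySem.List.pyGetD (cm.getD nb []) (if isLeft then (0:Int) else 1) 0 + 1) ≠ [] := by
      rw [helig]; simp
    rw [if_pos hmapne]
    obtain ⟨lold, hlold, hfold, hnold⟩ := hval ek hekmem
    have hekkeys : ek ∈ cm.keys := by rw [hkeys, PySem.Set.mem_update]; right; exact hekmem
    constructor
    · rw [PySem.Dict.keys_modify, PySem.Dict.keys_insert_of_contains]
      · exact hkeys
      · rw [PySem.Dict.contains_iff_mem_keys]; exact hekkeys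
    · intro e he
      rw [PySem.Dict.getD_modify]
      by_cases hee : e = ek
      · subst hee
        rw [if_pos rfl, hlold, pvVal_set]
        refine ⟨_, rfl, ?_, fun h => absurd h hnil⟩
        intro hme
        have hfinal : ∀ nb ∈ pvElig g G ek,
            PySem.List.pyGetD (cm.getD nb []) (if isLeft then (0:Int) else 1) 0
              = pvLVal g G m nb := by
          intro nb hnb
          obtain ⟨lnb, hl1, hl2⟩ := hread nb hnb
          have hGnb : G nb ek = true := (List.mem_filter.mp hnb).2
          have := hm nb ek hGnb
          rw [hl1, hl2 (by omega)]
        have hmapeq : (pvElig g G ek).map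
            (fun nb => PySem.List.pyGetD (cm.getD nb []) (if isLeft then (0:Int) else 1) 0 + 1)
            = (pvElig g G ek).map (fun nb => pvLVal g G m nb + 1) := by
          apply List.map_congr_left
          intro nb hnb
          rw [hfinal nb hnb]
        rw [hmapeq]
        have h1le : 1 ≤ pvLVal g G m nb0 + 1 := by
          have := pvLVal_one_le g G m nb0; omega
        rw [helig, List.map_cons, pvMax_getD_eq_foldl _ _ h1le,
          pvLVal_eq_fold g G m hm ek, helig, List.map_cons]
      · rw [if_neg hee]
        obtain ⟨l, hl, hfin, hnl⟩ := hval e he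
        refine ⟨l, hl, ?_, hnl⟩
        intro hme
        rcases Nat.lt_or_ge (m e) k with h | h
        · exact hfin h
        · have hmek : m e = k := by omega
          exfalso
          apply hee
          have h2 := (hDec e he).2
          rw [hmek] at h2
          rw [hek]; exact h2.symm

theorem pvSweep (sa : List Int) (g : PySem.Dict Int (List Int)) (G : Int → Int → Bool)
    (m : Int → Nat) (pos : Int → Int) (isLeft : Bool) (oth : Int → Int)
    (hm : ∀ nb e, G nb e = true → m nb < m e)
    (hClosed : ∀ e ∈ sa, ∀ nb ∈ g.getD e [], nb ∈ sa)
    (hPos : ∀ i : Int, 0 ≤ i → i < (sa.length : Int) → 0 ≤ pos i ∧ pos i < (sa.length : Int))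
    (hDec : ∀ e ∈ sa, m e < sa.length ∧ PySem.List.pyGetD sa (pos ((m e : Nat) : Int)) 0 = e)
    (cm0 : PySem.Dict Int (List Int)) (hinv0 : pvInv sa g G m isLeft oth 0 cm0) :
    ∀ k : Nat, k ≤ sa.length →
      pvInv sa g G m isLeft oth k
        ((PySem.List.pyRange 0 (k : Int) 1).foldl (pvBody sa g G pos isLeft) cm0) := by
  intro k
  induction k with
  | zero =>
      intro _
      rw [PySem.List.pyRange_one_eq_nil (by norm_num)]
      exact hinv0
  | succ k ih =>
      intro hk
      have hcast : ((k + 1 : Nat) : Int) = (k : Int) + 1 := by push_cast; ring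
      rw [hcast, PySem.List.pyRange_one_succ_right (by positivity), List.foldl_append]
      simp only [List.foldl_cons, List.foldl_nil, pvBody]
      exact pvSweep_step sa g G m pos isLeft oth hm hClosed hPos hDec k
        (by omega) _ (ih (by omega))

-- ---- dict built by inserting a pure function of each key ----
def pvCanonD (F : Int → List Int) (l : List Int) : PySem.Dict Int (List Int) :=
  l.foldl (fun d e => d.insert e (F e)) PySem.Dict.empty

theorem pvCanonD_getD (F : Int → List Int) :
    ∀ (l : List Int) (k : Int) (dflt : List Int),
      (pvCanonD F l).getD k dflt = if k ∈ l then F k else dflt := by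
  intro l
  induction l using List.reverseRecOn with
  | nil => intro k dflt; simp [pvCanonD, PySem.Dict.getD_empty]
  | append_singleton xs x ih =>
      intro k dflt
      unfold pvCanonD
      rw [List.foldl_append]
      simp only [List.foldl_cons, List.foldl_nil]
      rw [PySem.Dict.getD_insert]
      by_cases hkx : k = x
      · subst hkx; simp
      · rw [if_neg hkx]
        have := ih k dflt
        unfold pvCanonD at this
        rw [this]
        simp [List.mem_append, hkx]

theorem pvCanonD_keys (F : Int → List Int) (l : List Int) :
    (pvCanonD F l).keys = PySem.Set.update [] l := by
  unfold pvCanonD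
  rw [PySem.Dict.keys_foldl_insert (f := fun _ e => F e)]
  simp [PySem.Dict.keys_empty]

theorem pvCanonD_keys_nodup (F : Int → List Int) (l : List Int) :
    (pvCanonD F l).keys.Nodup := by
  rw [pvCanonD_keys, PySem.Set.update_nil_left]
  exact PySem.Set.nodup_ofList l

-- ---- the shared canonical result ----
def pvMl (sa : List Int) (e : Int) : Nat := ((pvIm sa).getD e 0).toNat
def pvMr (sa : List Int) (e : Int) : Nat := ((sa.length : Int) - 1 - (pvIm sa).getD e 0).toNat
def pvLL (sa : List Int) (graph : List (Int × List Int)) (e : Int) : Int :=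
  pvLVal (PySem.Dict.mk graph) (pvG (pvIm sa) true) (pvMl sa) e
def pvRR (sa : List Int) (graph : List (Int × List Int)) (e : Int) : Int :=
  pvLVal (PySem.Dict.mk graph) (pvG (pvIm sa) false) (pvMr sa) e
def pvCanonOut (sa : List Int) (graph : List (Int × List Int)) : List (Int × List Int) :=
  (PySem.Set.update ([] : List Int) sa).map (fun k => (k, [pvLL sa graph k, pvRR sa graph k]))

-- measure facts
theorem pvMl_hm (sa : List Int) :
    ∀ nb e, pvG (pvIm sa) true nb e = true → pvMl sa nb < pvMl sa e := by
  intro nb e h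
  simp only [pvG, if_pos, decide_eq_true_eq] at h
  have h1 := pvIm_getD_nonneg sa nb
  have h2 := pvIm_getD_nonneg sa e
  unfold pvMl
  omega

theorem pvMr_hm (sa : List Int) (hsa : sa ≠ []) :
    ∀ nb e, pvG (pvIm sa) false nb e = true → pvMr sa nb < pvMr sa e := by
  intro nb e h
  simp only [pvG, Bool.false_eq_true, if_false, decide_eq_true_eq, gt_iff_lt] at h
  have h1 := pvIm_getD_nonneg sa nb
  have h2 := pvIm_getD_nonneg sa e
  have h3 := pvIm_getD_lt sa hsa nb
  have h4 := pvIm_getD_lt sa hsa e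
  unfold pvMr
  omega

theorem pvMl_dec (sa : List Int) :
    ∀ e ∈ sa, pvMl sa e < sa.length ∧
      PySem.List.pyGetD sa ((fun (i : Int) => i) ((pvMl sa e : Nat) : Int)) 0 = e := by
  intro e he
  obtain ⟨j, hj, h1, h2⟩ := pvIm_last sa e he
  have hml : pvMl sa e = j := by unfold pvMl; omega
  refine ⟨by omega, ?_⟩
  simp only [hml]
  rw [PySem.List.pyGetD_natCast]
  simp [List.getD_eq_getElem?_getD, List.getElem?_eq_getElem hj, h2]

theorem pvMr_dec (sa : List Int) (hsa : sa ≠ []) :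
    ∀ e ∈ sa, pvMr sa e < sa.length ∧
      PySem.List.pyGetD sa ((fun (i : Int) => (sa.length : Int) - 1 - i) ((pvMr sa e : Nat) : Int)) 0 = e := by
  intro e he
  obtain ⟨j, hj, h1, h2⟩ := pvIm_last sa e he
  have h0 := pvIm_getD_nonneg sa e
  have hlt := pvIm_getD_lt sa hsa e
  have hmr : ((pvMr sa e : Nat) : Int) = (sa.length : Int) - 1 - (j : Int) := by
    unfold pvMr; rw [h1]; omega
  refine ⟨by unfold pvMr; omega, ?_⟩
  show PySem.List.pyGetD sa ((sa.length : Int) - 1 - ((pvMr sa e : Nat) : Int)) 0 = e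
  rw [hmr]
  have harith : (sa.length : Int) - 1 - ((sa.length : Int) - 1 - (j : Int)) = ((j : Nat) : Int) := by ring
  rw [harith, PySem.List.pyGetD_natCast]
  simp [List.getD_eq_getElem?_getD, List.getElem?_eq_getElem hj, h2]

-- ---- A: the port equals the canonical result ----
theorem lr_chain_init_split (sa : List Int) :
    lr_chain_init sa
      = ((PySem.List.pyRange 0 (sa.length : Int) 1).foldl
           (fun d i => d.insert (PySem.List.pyGetD sa i 0) ([1, 1] : List Int)) PySem.Dict.empty,
         (PySem.List.pyRange 0 (sa.length : Int) 1).foldl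
           (fun d i => d.insert (PySem.List.pyGetD sa i 0) i) PySem.Dict.empty) := by
  unfold lr_chain_init
  exact PySem.List.foldl_prod_mk
    (fun d i => d.insert (PySem.List.pyGetD sa i 0) ([1, 1] : List Int))
    (fun d i => d.insert (PySem.List.pyGetD sa i 0) i)
    (PySem.List.pyRange 0 (sa.length : Int) 1) PySem.Dict.empty PySem.Dict.empty

theorem lr_chain_init_snd (sa : List Int) : (lr_chain_init sa).2 = pvIm sa := by
  rw [lr_chain_init_split]
  unfold pvIm
  rw [PySem.List.enumerate_eq_map_pyRange sa 0, List.foldl_map]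
  simp

theorem lr_chain_init_fst (sa : List Int) :
    (lr_chain_init sa).1 = pvCanonD (fun _ => [1, 1]) sa := by
  rw [lr_chain_init_split]
  exact PySem.List.foldl_pyRange_zero_pyGetD' sa 0
    (fun d x => d.insert x ([1, 1] : List Int)) PySem.Dict.empty

theorem lr_chain_left_eq (g : PySem.Dict Int (List Int)) (im : PySem.Dict Int Int)
    (sa : List Int) (cm0 : PySem.Dict Int (List Int)) :
    lr_chain_left g im sa cm0
      = (PySem.List.pyRange 0 (sa.length : Int) 1).foldl
          (pvBody sa g (pvG im true) (fun i => i) true) cm0 := by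
  unfold lr_chain_left
  congr 1
  funext cm i
  simp [pvBody, pvG]

theorem lr_chain_right_eq (g : PySem.Dict Int (List Int)) (im : PySem.Dict Int Int)
    (sa : List Int) (cm0 : PySem.Dict Int (List Int)) :
    lr_chain_right g im sa cm0
      = (PySem.List.pyRange 0 (sa.length : Int) 1).foldl
          (pvBody sa g (pvG im false) (fun i => (sa.length : Int) - 1 - i) false) cm0 := by
  unfold lr_chain_right
  congr 1
  funext cm i
  simp [pvBody, pvG]

theorem pvValid_empty (L : Int → Int) : pvValid L PySem.Dict.empty := by
  intro k v h
  rw [PySem.Dict.get?_empty] at h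
  cases h

theorem pvVal_true_one (e l : Int) : pvVal true (fun _ => 1) e l = [l, 1] := by simp [pvVal]
theorem pvVal_false (oth : Int → Int) (e l : Int) : pvVal false oth e l = [oth e, l] := by
  simp [pvVal]

theorem lr_chain_eq_canon (sa : List Int) (graph : List (Int × List Int)) (hsa : sa ≠ [])
    (hpre : Pre_lr_chain sa graph) : lr_chain sa graph = pvCanonOut sa graph := by
  have hClosed : ∀ e ∈ sa, ∀ nb ∈ (PySem.Dict.mk graph).getD e [], nb ∈ sa :=
    fun e he => (hpre e he).2
  -- left sweep
  have hInvL : pvInv sa (PySem.Dict.mk graph) (pvG (pvIm sa) true) (pvMl sa) true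
      (fun _ => 1) sa.length
      (lr_chain_left (PySem.Dict.mk graph) (pvIm sa) sa (pvCanonD (fun _ => [1, 1]) sa)) := by
    rw [lr_chain_left_eq]
    refine pvSweep sa (PySem.Dict.mk graph) (pvG (pvIm sa) true) (pvMl sa) (fun i => i) true
      (fun _ => 1) (pvMl_hm sa) hClosed (fun i h1 h2 => ⟨h1, h2⟩) (pvMl_dec sa) _
      ?_ sa.length (le_refl _)
    constructor
    · exact pvCanonD_keys _ sa
    · intro e he
      refine ⟨1, ?_, by omega, fun _ => rfl⟩
      rw [pvCanonD_getD, pvVal_true_one]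
      split_ifs <;> rfl
  -- right sweep
  have hInvR : pvInv sa (PySem.Dict.mk graph) (pvG (pvIm sa) false) (pvMr sa) false
      (pvLL sa graph) sa.length
      (lr_chain_right (PySem.Dict.mk graph) (pvIm sa) sa
        (lr_chain_left (PySem.Dict.mk graph) (pvIm sa) sa (pvCanonD (fun _ => [1, 1]) sa))) := by
    rw [lr_chain_right_eq]
    refine pvSweep sa (PySem.Dict.mk graph) (pvG (pvIm sa) false) (pvMr sa)
      (fun i => (sa.length : Int) - 1 - i) false (pvLL sa graph) (pvMr_hm sa hsa) hClosed
      (fun i h1 h2 => ⟨by show (0:Int) ≤ (sa.length : Int) - 1 - i; omega,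
        by show (sa.length : Int) - 1 - i < (sa.length : Int); omega⟩)
      (pvMr_dec sa hsa) _ ?_ sa.length (le_refl _)
    obtain ⟨hkeysL, hvalL⟩ := hInvL
    constructor
    · exact hkeysL
    · intro e he
      obtain ⟨l, hl, hfin, _⟩ := hvalL e he
      have hle : l = pvLL sa graph e := hfin (pvMl_dec sa e he).1
      refine ⟨1, ?_, by omega, fun _ => rfl⟩
      rw [hl, pvVal_true_one, pvVal_false, hle]
  -- assemble
  obtain ⟨hkeys2, hval2⟩ := hInvR
  show (lr_chain_right (PySem.Dict.mk graph) (lr_chain_init sa).2 sa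
      (lr_chain_left (PySem.Dict.mk graph) (lr_chain_init sa).2 sa (lr_chain_init sa).1)).items
    = pvCanonOut sa graph
  rw [lr_chain_init_snd, lr_chain_init_fst]
  have hnodup : (lr_chain_right (PySem.Dict.mk graph) (pvIm sa) sa
      (lr_chain_left (PySem.Dict.mk graph) (pvIm sa) sa (pvCanonD (fun _ => [1, 1]) sa))).keys.Nodup := by
    rw [hkeys2, PySem.Set.update_nil_left]
    exact PySem.Set.nodup_ofList sa
  rw [PySem.Dict.items_eq_map_keys _ hnodup [1, 1], hkeys2]
  unfold pvCanonOut
  apply List.map_congr_left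
  intro k hk
  have hksa : k ∈ sa := by
    rcases (PySem.Set.mem_update [] sa k).mp hk with h | h
    · cases h
    · exact h
  obtain ⟨l, hl, hfin, _⟩ := hval2 k hksa
  have hle : l = pvRR sa graph k := hfin (pvMr_dec sa hsa k hksa).1
  rw [hl, pvVal_false, hle]

-- ---- B: the port equals the canonical result ----
theorem pvAlt_fold (g : PySem.Dict Int (List Int)) (im : PySem.Dict Int Int) (fuel : Nat)
    (mL mR : Int → Nat)
    (hmL : ∀ nb e, pvG im true nb e = true → mL nb < mL e)
    (hmR : ∀ nb e, pvG im false nb e = true → mR nb < mR e) :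
    ∀ (l : List Int) (st : PySem.Dict Int Int × PySem.Dict Int Int × PySem.Dict Int (List Int)),
      (∀ e ∈ l, mL e < fuel ∧ mR e < fuel) →
      pvValid (pvLVal g (pvG im true) mL) st.1 →
      pvValid (pvLVal g (pvG im false) mR) st.2.1 →
      (l.foldl
        (fun (st : PySem.Dict Int Int × PySem.Dict Int Int × PySem.Dict Int (List Int)) e =>
          let q1 := lr_chain_solve g im true fuel st.1 e
          let q2 := lr_chain_solve g im false fuel st.2.1 e
          (q1.1, q2.1, st.2.2.insert e [q1.2, q2.2])) st).2.2
        = l.foldl (fun d e =>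
            d.insert e [pvLVal g (pvG im true) mL e, pvLVal g (pvG im false) mR e]) st.2.2 := by
  intro l
  induction l with
  | nil => intro st _ _ _; rfl
  | cons e t ih =>
      intro st hb hv1 hv2
      simp only [List.foldl_cons]
      obtain ⟨hq12, hq11⟩ := pvSolve_correct g im true mL hmL fuel st.1 e
        (hb e List.mem_cons_self).1 hv1
      obtain ⟨hq22, hq21⟩ := pvSolve_correct g im false mR hmR fuel st.2.1 e
        (hb e List.mem_cons_self).2 hv2
      rw [ih _ (fun x hx => hb x (List.mem_cons_of_mem _ hx)) hq11 hq21]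
      simp only [hq12, hq22]

theorem lr_chain_alt_eq_canon (sa : List Int) (graph : List (Int × List Int)) (hsa : sa ≠ []) :
    lr_chain_alt sa graph = pvCanonOut sa graph := by
  show ((sa.foldl
      (fun (st : PySem.Dict Int Int × PySem.Dict Int Int × PySem.Dict Int (List Int)) e =>
        let q1 := lr_chain_solve (PySem.Dict.mk graph) (pvIm sa) true sa.length st.1 e
        let q2 := lr_chain_solve (PySem.Dict.mk graph) (pvIm sa) false sa.length st.2.1 e
        (q1.1, q2.1, st.2.2.insert e [q1.2, q2.2]))
      (PySem.Dict.empty, PySem.Dict.empty, PySem.Dict.empty)).2.2).items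
    = pvCanonOut sa graph
  rw [pvAlt_fold (PySem.Dict.mk graph) (pvIm sa) sa.length (pvMl sa) (pvMr sa)
    (pvMl_hm sa) (pvMr_hm sa hsa) sa
    (PySem.Dict.empty, PySem.Dict.empty, PySem.Dict.empty)
    (fun e he => ⟨(pvMl_dec sa e he).1, (pvMr_dec sa hsa e he).1⟩)
    (pvValid_empty _) (pvValid_empty _)]
  show (pvCanonD (fun k => [pvLL sa graph k, pvRR sa graph k]) sa).items = pvCanonOut sa graph
  rw [PySem.Dict.items_eq_map_keys _ (pvCanonD_keys_nodup _ sa) [1, 1], pvCanonD_keys]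
  unfold pvCanonOut
  apply List.map_congr_left
  intro k hk
  have hksa : k ∈ sa := by
    rcases (PySem.Set.mem_update [] sa k).mp hk with h | h
    · cases h
    · exact h
  rw [pvCanonD_getD, if_pos hksa]

theorem lr_chain_nil (graph : List (Int × List Int)) :
    lr_chain [] graph = lr_chain_alt [] graph := rfl

-- ===== VERDICT (by name: the statement is the Claim_ definition above) =====
theorem lr_chain_spec : Claim_equal_lr_chain := by
  intro sa graph _ hpre
  unfold Spec_lr_chain
  rcases eq_or_ne sa [] with hsa | hsa
  · subst hsa; exact lr_chain_nil graph
  · rw [lr_chain_eq_canon sa graph hsa hpre, lr_chain_alt_eq_canon sa graph hsa]
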